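-- pv_equiv track=rewrite | github.com/linusbui/Robo-CSK-Benchmark | collaboration/data_extraction/alfred_extractor.py | analyse_task_steps
-- ===== SOURCE A (Python) =====
-- def analyse_task_steps(desc: str) -> (int, bool):
--     count_arms = 0
--     walk = False
--     pick_ups = 0
--     place_downs = 0
--     for step in desc:
--         if is_walk_step(step.lower()):
--             walk = True
--         if is_pick_up_step(step.lower()):
--             pick_ups += 1
--         if is_place_down_step(step.lower()):
--             place_downs += 1
--         count_arms = max(count_arms, pick_ups - place_downs)
--     return count_arms, walk
--
-- def is_pick_up_step(step: str) -> bool: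
--     if ("pick" in step and "up" in step) or "grab" in step or "take" in step:
--         return True
--
-- def is_place_down_step(step: str) -> bool:
--     if "place" in step or "put" in step:
--         return True
--
-- def is_walk_step(step: str) -> bool:
--     if "walk" in step:
--         return True
-- ===== SOURCE B (Python) =====
-- def analyse_task_steps(desc):
--     # Right-to-left suffix recurrence: the peak number of simultaneously held
--     # items satisfies peak(step::rest) = max(0, delta(step) + peak(rest)),
--     # so one backward scan with a single accumulator suffices -- no running
--     # pick-up/place-down counters and no prefix maxima.
--     count_arms = 0
--     walk = False
--     for step in reversed(desc):
--         s = step.lower()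
--         d = ((("pick" in s and "up" in s) or "grab" in s or "take" in s)
--              - ("place" in s or "put" in s))
--         count_arms = max(0, d + count_arms)
--         walk = walk or "walk" in s
--     return count_arms, walk
-- ===== Notes on version B (the rewrite author's own statement) =====
-- stated objective: alternative
-- what changed: Instead of a forward loop maintaining pick-up/place-down counters and a running maximum of their difference, B scans the steps right-to-left with the suffix recurrence peak = max(0, delta + peak), Kadane-style, keeping one clamped accumulator and an or-folded walk flag.
import Mathlib
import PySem

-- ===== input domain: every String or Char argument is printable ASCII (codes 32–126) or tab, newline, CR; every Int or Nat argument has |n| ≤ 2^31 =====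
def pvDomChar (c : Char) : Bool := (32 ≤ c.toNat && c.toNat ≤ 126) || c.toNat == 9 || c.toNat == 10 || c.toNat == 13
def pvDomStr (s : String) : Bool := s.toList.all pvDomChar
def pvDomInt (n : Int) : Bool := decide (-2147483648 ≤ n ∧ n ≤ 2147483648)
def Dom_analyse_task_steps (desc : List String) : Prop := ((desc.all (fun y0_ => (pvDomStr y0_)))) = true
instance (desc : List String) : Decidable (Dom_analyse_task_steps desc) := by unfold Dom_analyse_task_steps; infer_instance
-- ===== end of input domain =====

-- B replaces A's forward loop over pick-up/place-down counters with a right-to-left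
-- scan using the suffix recurrence peak = max(0, delta + peak) (objective: alternative).

-- ===== PORT A =====
-- Python's helpers return True or fall through to None; used only for truthiness, ported as Bool.
def is_pick_up_step (step : String) : Bool :=
  (PySem.Str.isIn "pick" step && PySem.Str.isIn "up" step) || PySem.Str.isIn "grab" step || PySem.Str.isIn "take" step

def is_place_down_step (step : String) : Bool :=
  PySem.Str.isIn "place" step || PySem.Str.isIn "put" step

def is_walk_step (step : String) : Bool :=
  PySem.Str.isIn "walk" step

def analyse_task_steps (desc : List String) : Int × Bool :=
  let st := desc.foldl (fun (st : Int × Bool × Int × Int) step =>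
    let w := if is_walk_step (PySem.Str.lower step) then true else st.2.1
    let pu := if is_pick_up_step (PySem.Str.lower step) then st.2.2.1 + 1 else st.2.2.1
    let pd := if is_place_down_step (PySem.Str.lower step) then st.2.2.2 + 1 else st.2.2.2
    (max st.1 (pu - pd), w, pu, pd)) (0, false, 0, 0)
  (st.1, st.2.1)

-- ===== PORT B =====
-- the per-step net delta, computed from the already-lowered step (Python bool arithmetic as Int)
def b_delta (s : String) : Int :=
  (if (PySem.Str.isIn "pick" s && PySem.Str.isIn "up" s) || PySem.Str.isIn "grab" s || PySem.Str.isIn "take" s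
   then 1 else 0)
  - (if PySem.Str.isIn "place" s || PySem.Str.isIn "put" s then 1 else 0)

-- 'for step in reversed(desc)' = foldl over desc.reverse
def analyse_task_steps_alt (desc : List String) : Int × Bool :=
  desc.reverse.foldl (fun (st : Int × Bool) step =>
    let s := PySem.Str.lower step
    (max 0 (b_delta s + st.1), st.2 || PySem.Str.isIn "walk" s)) (0, false)

-- ===== PRECONDITION & SPEC =====
def Spec_analyse_task_steps (desc : List String) (out : Int × Bool) : Prop := out = analyse_task_steps_alt desc
instance (desc : List String) (out : Int × Bool) : Decidable (Spec_analyse_task_steps desc out) := by unfold Spec_analyse_task_steps; infer_instance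

-- ===== CLAIM (what is proved, stated in full; the proofs are below) =====
def Claim_equal_analyse_task_steps : Prop := ∀ (desc : List String), Dom_analyse_task_steps desc → Spec_analyse_task_steps desc (analyse_task_steps desc)

-- ===== LEMMAS AND PROOFS =====

-- running max of prefix sums: characterisation of A's count_arms
def runMax : List Int → Int → Int → Int
  | [], _, best => best
  | d :: t, cur, best => runMax t (cur + d) (max best (cur + d))

-- suffix recurrence: characterisation of B's count_arms
def sufMax : List Int → Int
  | [] => 0
  | d :: t => max 0 (d + sufMax t)

theorem sufMax_nonneg (l : List Int) : 0 ≤ sufMax l := by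
  cases l <;> simp [sufMax]

theorem aLoop_eq (l : List String) (ca : Int) (w : Bool) (pu pd : Int) :
    l.foldl (fun (st : Int × Bool × Int × Int) step =>
      let w := if is_walk_step (PySem.Str.lower step) then true else st.2.1
      let pu := if is_pick_up_step (PySem.Str.lower step) then st.2.2.1 + 1 else st.2.2.1
      let pd := if is_place_down_step (PySem.Str.lower step) then st.2.2.2 + 1 else st.2.2.2
      (max st.1 (pu - pd), w, pu, pd)) (ca, w, pu, pd)
    = (runMax (l.map (fun s => b_delta (PySem.Str.lower s))) (pu - pd) ca,
       w || l.any (fun s => is_walk_step (PySem.Str.lower s)),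
       pu + ((l.map (fun s => if is_pick_up_step (PySem.Str.lower s) then (1 : Int) else 0)).sum),
       pd + ((l.map (fun s => if is_place_down_step (PySem.Str.lower s) then (1 : Int) else 0)).sum)) := by
  induction l generalizing ca w pu pd with
  | nil => simp [runMax]
  | cons s t ih =>
    simp only [List.foldl_cons, List.map_cons, List.any_cons, List.sum_cons, runMax, ih]
    have hd : (if is_pick_up_step (PySem.Str.lower s) then pu + 1 else pu)
        - (if is_place_down_step (PySem.Str.lower s) then pd + 1 else pd)
        = pu - pd + b_delta (PySem.Str.lower s) := by
      unfold b_delta is_pick_up_step is_place_down_step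
      split_ifs <;> simp_all <;> ring
    rw [hd]
    simp only [Prod.mk.injEq]
    refine ⟨trivial, ?_, ?_, ?_⟩
    · cases w <;> cases is_walk_step (PySem.Str.lower s) <;> simp [is_walk_step]
    · split_ifs <;> ring
    · split_ifs <;> ring

theorem runMax_eq_sufMax (l : List Int) (cur best : Int) (h : cur ≤ best) :
    runMax l cur best = max best (cur + sufMax l) := by
  induction l generalizing cur best with
  | nil => simp [runMax, sufMax]; omega
  | cons d t ih =>
    have hs := sufMax_nonneg t
    rw [runMax, ih (cur + d) (max best (cur + d)) (le_max_right _ _)]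
    simp only [sufMax]
    omega

theorem bLoop_eq (l : List String) :
    l.reverse.foldl (fun (st : Int × Bool) step =>
      let s := PySem.Str.lower step
      (max 0 (b_delta s + st.1), st.2 || PySem.Str.isIn "walk" s)) (0, false)
    = (sufMax (l.map (fun s => b_delta (PySem.Str.lower s))),
       l.any (fun s => PySem.Str.isIn "walk" (PySem.Str.lower s))) := by
  induction l with
  | nil => simp [sufMax]
  | cons s t ih =>
    simp only [List.reverse_cons, List.foldl_append, ih, List.foldl_cons, List.foldl_nil,
      List.map_cons, List.any_cons, sufMax]
    rw [Bool.or_comm]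

-- ===== VERDICT (by name: the statement is the Claim_ definition above) =====
theorem analyse_task_steps_spec : Claim_equal_analyse_task_steps := by
  intro desc _
  unfold Spec_analyse_task_steps analyse_task_steps analyse_task_steps_alt
  rw [aLoop_eq, bLoop_eq]
  have h := sufMax_nonneg (desc.map (fun s => b_delta (PySem.Str.lower s)))
  simp only [zero_sub, neg_zero, Bool.false_or, is_walk_step]
  rw [runMax_eq_sufMax _ 0 0 le_rfl]
  congr 1
  omega
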